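-- pv_equiv track=rewrite | github.com/Khalifouille/divers_petit_projets | dofus2.0/dofus.py | cases_autour
-- ===== SOURCE A (Python) =====
-- def cases_autour(case_initiale, distance):
--     if distance == 0:
--         return [case_initiale]
--     cases = []
--     x_init, y_init = case_initiale
--
--     for x in range(x_init - distance, x_init + distance + 1):
--         for y in range(y_init - distance, y_init + distance + 1):
--             if (x, y) != case_initiale and abs(x - x_init) + abs(y - y_init) == distance:
--                 cases.append((x, y))
--
--     return cases
-- ===== SOURCE B (Python) =====
-- def cases_autour(case_initiale, distance):
--     if distance == 0:
--         return [case_initiale]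
--     x_init, y_init = case_initiale
--     cases = []
--     for dx in range(-distance, distance + 1):
--         r = distance - abs(dx)
--         if r == 0:
--             cases.append((x_init + dx, y_init))
--         else:
--             cases.append((x_init + dx, y_init - r))
--             cases.append((x_init + dx, y_init + r))
--     return cases
-- ===== Notes on version B (the rewrite author's own statement) =====
-- stated objective: faster
-- what changed: B walks the diamond perimeter directly, emitting y_init±(distance-|dx|) per column, instead of scanning the full (2d+1)x(2d+1) square and filtering by Manhattan distance.
import Mathlib
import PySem

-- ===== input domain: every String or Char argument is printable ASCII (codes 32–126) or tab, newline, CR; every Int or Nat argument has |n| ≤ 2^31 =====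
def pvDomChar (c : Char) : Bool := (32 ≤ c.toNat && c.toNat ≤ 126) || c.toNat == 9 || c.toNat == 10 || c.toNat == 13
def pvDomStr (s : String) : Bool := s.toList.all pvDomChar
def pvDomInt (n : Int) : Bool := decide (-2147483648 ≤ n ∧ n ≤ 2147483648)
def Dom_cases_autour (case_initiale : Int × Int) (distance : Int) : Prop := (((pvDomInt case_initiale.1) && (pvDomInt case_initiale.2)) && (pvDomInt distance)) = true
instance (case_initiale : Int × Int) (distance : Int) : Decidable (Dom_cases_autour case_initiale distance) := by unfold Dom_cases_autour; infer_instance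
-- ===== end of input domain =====

-- B enumerates the diamond perimeter directly (two cells per column) instead of scanning
-- the whole (2d+1)×(2d+1) square and filtering by Manhattan distance; same return value.

-- ===== PORT A =====
def cases_autour (case_initiale : Int × Int) (distance : Int) : List (Int × Int) :=
  if distance = 0 then [case_initiale]
  else
    let x_init := case_initiale.1
    let y_init := case_initiale.2
    (PySem.List.pyRange (x_init - distance) (x_init + distance + 1) 1).foldl
      (fun cases x =>
        (PySem.List.pyRange (y_init - distance) (y_init + distance + 1) 1).foldl
          (fun cases y =>
            if (x, y) ≠ case_initiale ∧ |x - x_init| + |y - y_init| = distance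
            then cases ++ [(x, y)] else cases)
          cases)
      []

-- ===== PORT B =====
def cases_autour_alt (case_initiale : Int × Int) (distance : Int) : List (Int × Int) :=
  if distance = 0 then [case_initiale]
  else
    let x_init := case_initiale.1
    let y_init := case_initiale.2
    (PySem.List.pyRange (-distance) (distance + 1) 1).foldl
      (fun cases dx =>
        let r := distance - |dx|
        if r = 0 then cases ++ [(x_init + dx, y_init)]
        else cases ++ [(x_init + dx, y_init - r), (x_init + dx, y_init + r)])
      []

-- ===== PRECONDITION & SPEC =====
def Spec_cases_autour (case_initiale : Int × Int) (distance : Int) (out : List (Int × Int)) : Prop := out = cases_autour_alt case_initiale distance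
instance (case_initiale : Int × Int) (distance : Int) (out : List (Int × Int)) : Decidable (Spec_cases_autour case_initiale distance out) := by unfold Spec_cases_autour; infer_instance

-- ===== CLAIM (what is proved, stated in full; the proofs are below) =====
def Claim_equal_cases_autour : Prop := ∀ (case_initiale : Int × Int) (distance : Int), Dom_cases_autour case_initiale distance → Spec_cases_autour case_initiale distance (cases_autour case_initiale distance)

-- ===== LEMMAS AND PROOFS =====

-- what A's inner y-loop selects for one column x: at most two cells, in ascending y order
lemma perCol (x0 y0 d x : Int) (hd : 0 < d) (h1 : x0 - d ≤ x) (h2 : x ≤ x0 + d) :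
    ((PySem.List.pyRange (y0 - d) (y0 + d + 1) 1).filter
        (fun y => decide ((x, y) ≠ (x0, y0) ∧ |x - x0| + |y - y0| = d))).map
      (fun y => (x, y))
    = if d - |x - x0| = 0 then [(x, y0)]
      else [(x, y0 - (d - |x - x0|)), (x, y0 + (d - |x - x0|))] := by
  set r := d - |x - x0| with hr
  have habs : |x - x0| ≤ d := by
    rcases abs_cases (x - x0) with ⟨h, _⟩ | ⟨h, _⟩ <;> omega
  have habs0 : 0 ≤ |x - x0| := abs_nonneg _
  have hr0 : 0 ≤ r := by omega
  by_cases hz : r = 0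
  · -- |x - x0| = d > 0, the only cell is (x, y0), and x ≠ x0
    have hxne : x ≠ x0 := by
      rcases abs_cases (x - x0) with ⟨h, _⟩ | ⟨h, _⟩ <;> omega
    rw [PySem.List.pyRange_one_append (y0 - d) y0 (y0 + d + 1) (by omega) (by omega),
        PySem.List.pyRange_one_append y0 (y0 + 1) (y0 + d + 1) (by omega) (by omega),
        PySem.List.pyRange_one_singleton]
    simp only [List.filter_append, if_pos hz]
    have hnil1 : (PySem.List.pyRange (y0 - d) y0 1).filter
        (fun y => decide ((x, y) ≠ (x0, y0) ∧ |x - x0| + |y - y0| = d)) = [] := by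
      rw [List.filter_eq_nil_iff]
      intro y hy
      rw [PySem.List.mem_pyRange_one] at hy
      simp only [decide_eq_true_eq, not_and]
      intro _
      rcases abs_cases (y - y0) with ⟨h, _⟩ | ⟨h, _⟩ <;> omega
    have hnil2 : (PySem.List.pyRange (y0 + 1) (y0 + d + 1) 1).filter
        (fun y => decide ((x, y) ≠ (x0, y0) ∧ |x - x0| + |y - y0| = d)) = [] := by
      rw [List.filter_eq_nil_iff]
      intro y hy
      rw [PySem.List.mem_pyRange_one] at hy
      simp only [decide_eq_true_eq, not_and]
      intro _
      rcases abs_cases (y - y0) with ⟨h, _⟩ | ⟨h, _⟩ <;> omega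
    have hmid : List.filter
        (fun y => decide ((x, y) ≠ (x0, y0) ∧ |x - x0| + |y - y0| = d)) [y0] = [y0] := by
      simp only [List.filter_cons, List.filter_nil]
      rw [if_pos]
      simp only [decide_eq_true_eq]
      constructor
      · intro hc; exact hxne (congrArg Prod.fst hc)
      · simp only [sub_self, abs_zero, add_zero]; omega
    rw [hnil1, hnil2, hmid]
    simp
  · -- 0 < r: the two cells y0 - r and y0 + r, ascending
    have hrpos : 0 < r := by omega
    have hy0 : (y0 : Int) - r ≠ y0 := by omega
    rw [PySem.List.pyRange_one_append (y0 - d) (y0 - r) (y0 + d + 1) (by omega) (by omega),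
        PySem.List.pyRange_one_append (y0 - r) (y0 - r + 1) (y0 + d + 1) (by omega) (by omega),
        PySem.List.pyRange_one_append (y0 - r + 1) (y0 + r) (y0 + d + 1) (by omega) (by omega),
        PySem.List.pyRange_one_append (y0 + r) (y0 + r + 1) (y0 + d + 1) (by omega) (by omega),
        PySem.List.pyRange_one_singleton]
    have hsing : PySem.List.pyRange (y0 + r) (y0 + r + 1) 1 = [y0 + r] :=
      PySem.List.pyRange_one_singleton _
    rw [hsing]
    simp only [List.filter_append, if_neg hz]
    have hnil : ∀ a b : Int, (∀ y, a ≤ y → y < b → |y - y0| ≠ r) →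
        (PySem.List.pyRange a b 1).filter
          (fun y => decide ((x, y) ≠ (x0, y0) ∧ |x - x0| + |y - y0| = d)) = [] := by
      intro a b h
      rw [List.filter_eq_nil_iff]
      intro y hy
      rw [PySem.List.mem_pyRange_one] at hy
      simp only [decide_eq_true_eq, not_and]
      intro _ hsum
      exact h y hy.1 hy.2 (by omega)
    have h1' := hnil (y0 - d) (y0 - r) (by intro y hy1 hy2; rcases abs_cases (y - y0) with ⟨h, _⟩ | ⟨h, _⟩ <;> omega)
    have h2' := hnil (y0 - r + 1) (y0 + r) (by intro y hy1 hy2; rcases abs_cases (y - y0) with ⟨h, _⟩ | ⟨h, _⟩ <;> omega)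
    have h3' := hnil (y0 + r + 1) (y0 + d + 1) (by intro y hy1 hy2; rcases abs_cases (y - y0) with ⟨h, _⟩ | ⟨h, _⟩ <;> omega)
    rw [h1', h2', h3']
    have hkeep : ∀ y : Int, |y - y0| = r →
        List.filter (fun y => decide ((x, y) ≠ (x0, y0) ∧ |x - x0| + |y - y0| = d)) [y] = [y] := by
      intro y hy
      simp only [List.filter_cons, List.filter_nil]
      rw [if_pos]
      simp only [decide_eq_true_eq]
      refine ⟨?_, by omega⟩
      intro hc
      have hyy : y = y0 := congrArg Prod.snd hc
      subst hyy
      simp only [sub_self, abs_zero] at hy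
      omega
    rw [hkeep (y0 - r) (by rcases abs_cases (y0 - r - y0) with ⟨h, _⟩ | ⟨h, _⟩ <;> omega),
        hkeep (y0 + r) (by rcases abs_cases (y0 + r - y0) with ⟨h, _⟩ | ⟨h, _⟩ <;> omega)]
    simp

theorem cases_autour_spec : Claim_equal_cases_autour := by
  intro ci d _
  unfold Spec_cases_autour cases_autour cases_autour_alt
  obtain ⟨x0, y0⟩ := ci
  by_cases h0 : d = 0
  · simp [h0]
  · simp only [if_neg h0]
    by_cases hd : 0 < d
    · -- turn A's inner loop into a filter, both folds into appends, compare columns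
      have hA : ∀ (acc : List (Int × Int)) (x : Int),
          (PySem.List.pyRange (y0 - d) (y0 + d + 1) 1).foldl
            (fun cases y => if (x, y) ≠ (x0, y0) ∧ |x - x0| + |y - y0| = d
                            then cases ++ [(x, y)] else cases) acc
          = acc ++ ((PySem.List.pyRange (y0 - d) (y0 + d + 1) 1).filter
              (fun y => decide ((x, y) ≠ (x0, y0) ∧ |x - x0| + |y - y0| = d))).map
              (fun y => (x, y)) := by
        intro acc x
        rw [← PySem.List.foldl_append_if
              (fun y => decide ((x, y) ≠ (x0, y0) ∧ |x - x0| + |y - y0| = d))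
              (fun y => (x, y))]
        apply PySem.List.foldl_congr_mem
        intro a y _
        by_cases hp : (x, y) ≠ (x0, y0) ∧ |x - x0| + |y - y0| = d
        · rw [if_pos hp, if_pos (decide_eq_true hp)]
        · rw [if_neg hp, if_neg (by simp only [decide_eq_true_eq]; exact hp)]
      -- rewrite both outer folds over a common index range
      rw [PySem.List.pyRange_one (x0 - d), PySem.List.pyRange_one (-d)]
      have hlen : (x0 + d + 1 - (x0 - d)).toNat = (d + 1 - -d).toNat := by omega
      rw [hlen, List.foldl_map, List.foldl_map]
      apply PySem.List.foldl_congr_mem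
      intro acc k hk
      have hk' : (k : Int) ≤ 2 * d := by
        have := List.mem_range.mp hk
        omega
      rw [hA]
      have hx1 : x0 - d ≤ x0 - d + (k : Int) := by omega
      have hx2 : x0 - d + (k : Int) ≤ x0 + d := by omega
      rw [perCol x0 y0 d (x0 - d + (k : Int)) hd hx1 hx2]
      have he : x0 - d + (k : Int) - x0 = -d + (k : Int) := by ring
      have he2 : x0 + (-d + (k : Int)) = x0 - d + (k : Int) := by ring
      rw [he, he2]
      split_ifs <;> rfl
    · -- d < 0: both ranges are empty
      have hd' : d < 0 := by omega
      rw [PySem.List.pyRange_one_eq_nil (by omega : x0 + d + 1 ≤ x0 - d),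
          PySem.List.pyRange_one_eq_nil (by omega : d + 1 ≤ -d)]
      rfl
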